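-- pv_equiv track=rewrite | github.com/jssellars/aniket_filed | Core/Web/FacebookGraphAPI/GraphAPI/GraphAPIClientHelper.py | sorted_zip_longest
-- ===== SOURCE A (Python) =====
-- def sorted_zip_longest(l1, l2, key, fillvalue=None):
--     if fillvalue is None:
--         fillvalue = {}
--     l1 = iter(sorted(l1, key=lambda x: x.get(key)))
--     l2 = iter(sorted(l2, key=lambda x: x.get(key)))
--     u = next(l1, None)
--     v = next(l2, None)
--
--     while (u is not None) or (v is not None):
--         if u is None:
--             yield fillvalue, v
--             v = next(l2, None)
--         elif v is None:
--             yield u, fillvalue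
--             u = next(l1, None)
--         elif u.get(key) == v.get(key):
--             yield u, v
--             u = next(l1, None)
--             v = next(l2, None)
--         elif u.get(key) < v.get(key):
--             yield u, fillvalue
--             u = next(l1, None)
--         else:
--             yield fillvalue, v
--             v = next(l2, None)
-- ===== SOURCE B (Python) =====
-- def sorted_zip_longest(l1, l2, key, fillvalue=None):
--     if fillvalue is None:
--         fillvalue = {}
--     g1 = {}
--     for x in l1:
--         g1.setdefault(x.get(key), []).append(x)
--     g2 = {}
--     for y in l2:
--         g2.setdefault(y.get(key), []).append(y)
--     for k in sorted(set(g1) | set(g2)):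
--         a = g1.get(k, [])
--         b = g2.get(k, [])
--         for i in range(max(len(a), len(b))):
--             yield (a[i] if i < len(a) else fillvalue,
--                    b[i] if i < len(b) else fillvalue)
-- ===== Notes on version B (the rewrite author's own statement) =====
-- stated objective: alternative
-- what changed: Replaces A's sort-both-lists-and-merge-with-two-iterators by building a dict of groups per key value for each list in one pass, sorting only the distinct key values, and yielding zip-longest pairs per key group.
import Mathlib
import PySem

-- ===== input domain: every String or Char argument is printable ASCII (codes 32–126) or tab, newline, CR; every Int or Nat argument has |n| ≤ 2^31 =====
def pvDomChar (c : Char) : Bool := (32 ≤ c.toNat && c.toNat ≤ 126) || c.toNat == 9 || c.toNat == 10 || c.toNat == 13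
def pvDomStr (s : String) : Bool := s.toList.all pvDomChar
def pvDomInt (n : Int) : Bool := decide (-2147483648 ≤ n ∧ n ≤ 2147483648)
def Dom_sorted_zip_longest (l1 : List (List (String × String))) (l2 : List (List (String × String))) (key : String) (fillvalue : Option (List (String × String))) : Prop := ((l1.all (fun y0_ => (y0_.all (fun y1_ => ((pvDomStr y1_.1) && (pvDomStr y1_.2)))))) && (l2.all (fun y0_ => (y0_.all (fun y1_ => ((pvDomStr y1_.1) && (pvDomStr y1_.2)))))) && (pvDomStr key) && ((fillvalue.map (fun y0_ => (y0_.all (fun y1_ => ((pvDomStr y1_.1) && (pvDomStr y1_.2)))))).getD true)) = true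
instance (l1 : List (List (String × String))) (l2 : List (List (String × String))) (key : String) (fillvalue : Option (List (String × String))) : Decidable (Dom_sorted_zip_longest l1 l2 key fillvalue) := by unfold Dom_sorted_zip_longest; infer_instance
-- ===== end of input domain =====

-- B replaces A's sort-both-lists-then-merge with group-by-key dictionaries plus one sort of the
-- distinct keys (an alternative algorithm, similar cost; both functions are generators and the
-- equivalence is about the returned sequence of pairs).

-- x.get(key): first-match association-list lookup (the Lean rendering of the Python dict argument)
def pvGet (key : String) (d : List (String × String)) : Option String :=
  (PySem.Dict.mk d).get? key

-- Python orders the Optional[str] sort keys by comparing the strings themselves; pvEnc renders that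
-- key as a String, injectively and order-faithfully on present keys (none ↦ "", some s ↦ "0" ++ s).
-- Exact wherever Python's comparisons return; on Pre_ below None is never compared with a str.
def pvEnc : Option String → String
  | none => ""
  | some s => String.ofList ('0' :: s.toList)

def pvKey (key : String) (x : List (String × String)) : String := pvEnc (pvGet key x)

-- ===== PORT A =====
-- A's while-loop over the two sorted iterators; u/v being None corresponds to [] here.
def pvMergeA (key : String) (fill : List (String × String)) :
    List (List (String × String)) → List (List (String × String)) →
    List ((List (String × String)) × (List (String × String)))
  | [], [] => []
  | [], v :: t2 => (fill, v) :: pvMergeA key fill [] t2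
  | u :: t1, [] => (u, fill) :: pvMergeA key fill t1 []
  | u :: t1, v :: t2 =>
    if pvGet key u == pvGet key v then (u, v) :: pvMergeA key fill t1 t2
    else if pvKey key u < pvKey key v then (u, fill) :: pvMergeA key fill t1 (v :: t2)
    else (fill, v) :: pvMergeA key fill (u :: t1) t2
termination_by s1 s2 => s1.length + s2.length
decreasing_by all_goals (simp only [List.length_cons]; omega)

def sorted_zip_longest (l1 : List (List (String × String))) (l2 : List (List (String × String))) (key : String) (fillvalue : Option (List (String × String))) : List ((List (String × String)) × (List (String × String))) :=
  let fill := fillvalue.getD []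
  pvMergeA key fill (PySem.List.sorted l1 (pvKey key)) (PySem.List.sorted l2 (pvKey key))

-- ===== PORT B =====
-- Source B's inner loop: for i in range(max(len(a), len(b))): yield (a[i] if i < len(a) else fill, …)
def pvZipFill (fill : List (String × String)) (a b : List (List (String × String))) :
    List ((List (String × String)) × (List (String × String))) :=
  (PySem.List.pyRange 0 (max (PySem.List.len a) (PySem.List.len b)) 1).map
    (fun i => ((if i < PySem.List.len a then PySem.List.pyGetD a i [] else fill),
               (if i < PySem.List.len b then PySem.List.pyGetD b i [] else fill)))

-- g.setdefault(x.get(key), []).append(x) over the list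
def pvGroup (key : String) (l : List (List (String × String))) :
    PySem.Dict (Option String) (List (List (String × String))) :=
  l.foldl (fun d x => d.modify (pvGet key x) [] (fun g => g ++ [x])) PySem.Dict.empty

def sorted_zip_longest_alt (l1 : List (List (String × String))) (l2 : List (List (String × String))) (key : String) (fillvalue : Option (List (String × String))) : List ((List (String × String)) × (List (String × String))) :=
  let fill := fillvalue.getD []
  let g1 := pvGroup key l1
  let g2 := pvGroup key l2
  -- sorted(set(g1) | set(g2)); the Optional[str] keys are ordered via pvEnc (see its comment)
  let ks := PySem.List.sorted (PySem.Set.union (PySem.Set.ofList g1.keys) g2.keys) pvEnc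
  ks.flatMap (fun q => pvZipFill fill (g1.getD q []) (g2.getD q []))

-- ===== PRECONDITION & SPEC =====
-- Pre_ excludes exactly the inputs on which the Python A raises TypeError: a list of length ≥ 2
-- containing a dict without the key (the sort compares None), or two nonempty lists whose
-- key-presence differs (the merge compares None with a str).  The Lean ports are total (pvEnc
-- totalises the key order), so the proof needs no other fact from Pre_.
def Pre_sorted_zip_longest (l1 : List (List (String × String))) (l2 : List (List (String × String))) (key : String) (fillvalue : Option (List (String × String))) : Prop :=
  (l1.length ≤ 1 ∨ ∀ d ∈ l1, (pvGet key d).isSome) ∧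
  (l2.length ≤ 1 ∨ ∀ d ∈ l2, (pvGet key d).isSome) ∧
  (l1 = [] ∨ l2 = [] ∨ (∀ d ∈ l1 ++ l2, (pvGet key d).isSome) ∨ (∀ d ∈ l1 ++ l2, ¬ (pvGet key d).isSome))
instance (l1 : List (List (String × String))) (l2 : List (List (String × String))) (key : String) (fillvalue : Option (List (String × String))) : Decidable (Pre_sorted_zip_longest l1 l2 key fillvalue) := by unfold Pre_sorted_zip_longest; infer_instance

def pvWitness_sorted_zip_longest : (List (List (String × String))) × (List (List (String × String))) × String × (Option (List (String × String))) :=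
  ([[("k", "b")], [("k", "a")]], [[("k", "a"), ("x", "y")]], "k", none)

def Spec_sorted_zip_longest (l1 : List (List (String × String))) (l2 : List (List (String × String))) (key : String) (fillvalue : Option (List (String × String))) (out : List ((List (String × String)) × (List (String × String)))) : Prop := out = sorted_zip_longest_alt l1 l2 key fillvalue
instance (l1 : List (List (String × String))) (l2 : List (List (String × String))) (key : String) (fillvalue : Option (List (String × String))) (out : List ((List (String × String)) × (List (String × String)))) : Decidable (Spec_sorted_zip_longest l1 l2 key fillvalue out) := by unfold Spec_sorted_zip_longest; infer_instance

-- ===== CLAIM (what is proved, stated in full; the proofs are below) =====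
def Claim_equal_sorted_zip_longest : Prop := ∀ (l1 : List (List (String × String))) (l2 : List (List (String × String))) (key : String) (fillvalue : Option (List (String × String))), Dom_sorted_zip_longest l1 l2 key fillvalue → Pre_sorted_zip_longest l1 l2 key fillvalue → Spec_sorted_zip_longest l1 l2 key fillvalue (sorted_zip_longest l1 l2 key fillvalue)

-- ===== LEMMAS AND PROOFS =====

theorem pvEnc_inj : Function.Injective pvEnc := by
  intro a b h
  cases a <;> cases b
  · rfl
  · exact absurd (congrArg String.toList h) (by simp [pvEnc])
  · exact absurd (congrArg String.toList h) (by simp [pvEnc])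
  · have h2 := congrArg String.toList h
    simp [pvEnc] at h2
    simp [String.toList_inj.mp h2]

-- structural form of Source B's index loop
def pvZipF (fill : List (String × String)) :
    List (List (String × String)) → List (List (String × String)) →
    List ((List (String × String)) × (List (String × String)))
  | [], [] => []
  | [], y :: b => (fill, y) :: pvZipF fill [] b
  | x :: a, [] => (x, fill) :: pvZipF fill a []
  | x :: a, y :: b => (x, y) :: pvZipF fill a b
termination_by a b => a.length + b.length
decreasing_by all_goals (simp only [List.length_cons]; omega)

theorem zipF_range (fill : List (String × String)) : ∀ a b : List (List (String × String)),
    (List.range (max a.length b.length)).map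
      (fun k => ((if k < a.length then a.getD k [] else fill), (if k < b.length then b.getD k [] else fill)))
      = pvZipF fill a b := by
  intro a
  induction a with
  | nil =>
    intro b
    induction b with
    | nil => simp [pvZipF]
    | cons y bs ihb =>
      rw [show max ([] : List (List (String × String))).length (y :: bs).length = bs.length + 1 by simp,
          List.range_succ_eq_map]
      simp only [List.map_cons, List.map_map]
      rw [pvZipF]
      refine List.cons_eq_cons.mpr ⟨by simp, ?_⟩
      rw [← ihb]
      rw [show max ([] : List (List (String × String))).length bs.length = bs.length by simp]
      apply List.map_congr_left
      intro k _
      simp [Function.comp]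
  | cons x as iha =>
    intro b
    cases b with
    | nil =>
      rw [show max (x :: as).length ([] : List (List (String × String))).length = as.length + 1 by simp,
          List.range_succ_eq_map]
      simp only [List.map_cons, List.map_map]
      rw [pvZipF]
      refine List.cons_eq_cons.mpr ⟨by simp, ?_⟩
      rw [← iha []]
      rw [show max as.length ([] : List (List (String × String))).length = as.length by simp]
      apply List.map_congr_left
      intro k _
      simp [Function.comp]
    | cons y bs =>
      rw [show max (x :: as).length (y :: bs).length = max as.length bs.length + 1 by
            simp [Nat.succ_max_succ],
          List.range_succ_eq_map]
      simp only [List.map_cons, List.map_map]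
      rw [pvZipF]
      refine List.cons_eq_cons.mpr ⟨by simp, ?_⟩
      rw [← iha bs]
      apply List.map_congr_left
      intro k _
      simp [Function.comp]

theorem pvZipFill_eq (fill : List (String × String)) (a b : List (List (String × String))) :
    pvZipFill fill a b = pvZipF fill a b := by
  rw [← zipF_range]
  unfold pvZipFill
  rw [PySem.List.pyRange_one]
  simp only [PySem.List.len_eq, sub_zero, ← Nat.cast_max, Int.toNat_natCast, List.map_map]
  apply List.map_congr_left
  intro k hk
  simp [Function.comp, PySem.List.pyGetD_natCast, Nat.cast_lt]

theorem pvGroup_getD_aux (key : String) (q : Option String) :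
    ∀ (l : List (List (String × String))) (d : PySem.Dict (Option String) (List (List (String × String)))),
    ((l.foldl (fun d x => d.modify (pvGet key x) [] (fun g => g ++ [x])) d).getD q []) =
      d.getD q [] ++ l.filter (fun x => pvGet key x == q) := by
  intro l
  induction l with
  | nil => simp
  | cons x xs ih =>
    intro d
    rw [List.foldl_cons, ih]
    rw [PySem.Dict.modify, PySem.Dict.getD_insert]
    by_cases h : pvGet key x = q
    · simp [h]
    · simp [h, Ne.symm h]

theorem pvGroup_getD (key : String) (l : List (List (String × String))) (q : Option String) :
    (pvGroup key l).getD q [] = l.filter (fun x => pvGet key x == q) := by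
  rw [pvGroup, pvGroup_getD_aux]
  simp [PySem.Dict.empty, PySem.Dict.getD, PySem.Dict.get?]

theorem pvGroup_keys (key : String) (l : List (List (String × String))) :
    (pvGroup key l).keys = PySem.Set.ofList (l.map (pvGet key)) := by
  rw [pvGroup, PySem.Dict.keys_foldl_modify_key l (pvGet key) [] (fun _ x g => g ++ [x])]
  rfl

-- stability of the sort: a filter that keeps only elements of one sort-key class is unchanged by it
theorem pvFilter_insertBy (key : String) (p : List (String × String) → Bool) (c : String)
    (hp : ∀ x, p x = true → pvKey key x = c) (x : List (String × String)) :
    ∀ s : List (List (String × String)), s.Pairwise (fun a b => pvKey key a ≤ pvKey key b) →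
      (PySem.List.insertBy (fun a b => decide (pvKey key a < pvKey key b)) x s).filter p
        = s.filter p ++ if p x then [x] else [] := by
  intro s
  induction s with
  | nil =>
    intro _
    cases hpx : p x <;> simp [PySem.List.insertBy, hpx]
  | cons y ys ih =>
    intro hs
    rw [PySem.List.insertBy]
    by_cases hlt : pvKey key x < pvKey key y
    · rw [if_pos (by simp [hlt])]
      by_cases hx : p x = true
      · have hc := hp x hx
        have hnil : (y :: ys).filter p = [] := by
          apply List.filter_eq_nil_iff.mpr
          intro z hz hpz
          have hcz := hp z hpz
          have hyz : pvKey key y ≤ pvKey key z := by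
            rcases hz with _ | hz
            · exact le_refl _
            · exact (List.pairwise_cons.mp hs).1 z (by assumption)
          rw [hcz] at hyz
          rw [hc] at hlt
          exact absurd (lt_of_lt_of_le hlt hyz) (lt_irrefl c)
        rw [List.filter_cons_of_pos hx, hnil]
        simp [hx]
      · rw [List.filter_cons_of_neg (by simpa using hx)]
        simp [hx]
    · rw [if_neg (by simp [hlt])]
      rw [List.filter_cons, List.filter_cons, ih (List.pairwise_cons.mp hs).2]
      by_cases hy : p y = true <;> simp [hy]

theorem pvFilter_sorted (key : String) (p : List (String × String) → Bool) (c : String)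
    (hp : ∀ x, p x = true → pvKey key x = c) (l : List (List (String × String))) :
    (PySem.List.sorted l (pvKey key)).filter p = l.filter p := by
  induction l using List.reverseRecOn with
  | nil => simp
  | append_singleton ys x ih =>
    have hs : PySem.List.sorted (ys ++ [x]) (pvKey key)
        = PySem.List.insertBy (fun a b => decide (pvKey key a < pvKey key b)) x
            (PySem.List.sorted ys (pvKey key)) := by
      rw [PySem.List.sorted_eq_foldl_insertBy, PySem.List.sorted_eq_foldl_insertBy,
        List.foldl_append, List.foldl_cons, List.foldl_nil]
    rw [hs, pvFilter_insertBy key p c hp x _ (PySem.List.sorted_pairwise ys (pvKey key)),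
      ih, List.filter_append]
    cases hpx : p x <;> simp [hpx]

theorem pvKey_ne_of_gt {key : String} {q : Option String} {x : List (String × String)}
    (h : pvEnc q < pvKey key x) : (pvGet key x == q) = false := by
  rw [beq_eq_false_iff_ne]
  intro he
  rw [pvKey, he] at h
  exact lt_irrefl _ h

-- consuming one key-block of A's merge
theorem pvMergeA_block (key : String) (fill : List (String × String)) (q : Option String) :
    ∀ (A1 A2 r1 r2 : List (List (String × String))),
      (∀ x ∈ A1, pvGet key x = q) → (∀ x ∈ A2, pvGet key x = q) →
      (∀ x ∈ r1, pvEnc q < pvKey key x) → (∀ x ∈ r2, pvEnc q < pvKey key x) →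
      pvMergeA key fill (A1 ++ r1) (A2 ++ r2) = pvZipF fill A1 A2 ++ pvMergeA key fill r1 r2 := by
  intro A1
  induction A1 with
  | nil =>
    intro A2
    induction A2 with
    | nil =>
      intro r1 r2 _ _ _ _
      simp [pvZipF]
    | cons y ys ih2 =>
      intro r1 r2 h1 h2 g1 g2
      have hyq : pvGet key y = q := h2 y (by simp)
      cases r1 with
      | nil =>
        simp only [List.nil_append]
        rw [List.cons_append, pvMergeA.eq_2, pvZipF.eq_2]
        have := ih2 [] r2 h1 (fun x hx => h2 x (by simp [hx])) (by simp) g2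
        simp only [List.nil_append] at this
        rw [this]
        simp
      | cons u t1 =>
        have hu := g1 u (by simp)
        have hbeq : (pvGet key u == pvGet key y) = false := by
          rw [hyq]; exact pvKey_ne_of_gt hu
        have hnlt : ¬ pvKey key u < pvKey key y := by
          simp only [pvKey, hyq]
          exact not_lt.mpr (le_of_lt hu)
        simp only [List.nil_append]
        rw [List.cons_append, pvMergeA.eq_4]
        rw [hbeq]
        simp only [Bool.false_eq_true, if_false, hnlt]
        rw [pvZipF.eq_2]
        have := ih2 (u :: t1) r2 h1 (fun x hx => h2 x (by simp [hx])) g1 g2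
        simp only [List.nil_append] at this
        rw [this]
        simp
  | cons x xs ih1 =>
    intro A2 r1 r2 h1 h2 g1 g2
    have hxq : pvGet key x = q := h1 x (by simp)
    cases A2 with
    | nil =>
      cases r2 with
      | nil =>
        simp only [List.nil_append]
        rw [List.cons_append, pvMergeA.eq_3, pvZipF.eq_3]
        have := ih1 [] r1 [] (fun z hz => h1 z (by simp [hz])) (by simp) g1 (by simp)
        simp only [List.append_nil] at this
        rw [this]
        simp
      | cons v t2 =>
        have hv := g2 v (by simp)
        have hbeq : (pvGet key x == pvGet key v) = false := by
          rw [beq_eq_false_iff_ne]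
          intro he
          rw [pvKey, ← he, hxq] at hv
          exact lt_irrefl _ hv
        have hlt : pvKey key x < pvKey key v := by
          simp only [pvKey, hxq]; exact hv
        simp only [List.nil_append]
        rw [List.cons_append, pvMergeA.eq_4]
        rw [hbeq]
        simp only [Bool.false_eq_true, if_false, hlt, if_true]
        rw [pvZipF.eq_3]
        have := ih1 [] r1 (v :: t2) (fun z hz => h1 z (by simp [hz])) (by simp) g1 g2
        simp only [List.nil_append] at this
        rw [this]
        simp
    | cons y ys =>
      have hyq : pvGet key y = q := h2 y (by simp)
      have hbeq : (pvGet key x == pvGet key y) = true := by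
        rw [beq_iff_eq, hxq, hyq]
      rw [List.cons_append, List.cons_append, pvMergeA.eq_4, hbeq]
      simp only [if_true]
      rw [pvZipF.eq_4]
      have := ih1 ys r1 r2 (fun z hz => h1 z (by simp [hz])) (fun z hz => h2 z (by simp [hz])) g1 g2
      rw [this]
      simp

theorem pvDropWhile_gt (key : String) (q : Option String) :
    ∀ s : List (List (String × String)), s.Pairwise (fun a b => pvKey key a ≤ pvKey key b) →
      (∀ x ∈ s, pvEnc q ≤ pvKey key x) →
      ∀ x ∈ s.dropWhile (fun x => pvGet key x == q), pvEnc q < pvKey key x := by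
  intro s
  induction s with
  | nil => intro _ _ x hx; simp [List.dropWhile] at hx
  | cons z t ih =>
    intro hs hmin x hx
    by_cases hz : (pvGet key z == q) = true
    · rw [List.dropWhile_cons_of_pos (p := fun x => pvGet key x == q) hz] at hx
      exact ih (List.pairwise_cons.mp hs).2 (fun y hy => hmin y (by simp [hy])) x hx
    · rw [List.dropWhile_cons_of_neg (p := fun x => pvGet key x == q) hz] at hx
      have hzgt : pvEnc q < pvKey key z := by
        apply lt_of_le_of_ne (hmin z (by simp))
        intro he
        apply hz
        rw [beq_iff_eq]
        exact (pvEnc_inj (by simpa [pvKey] using he)).symm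
      rcases List.mem_cons.mp hx with rfl | hxt
      · exact hzgt
      · exact lt_of_lt_of_le hzgt ((List.pairwise_cons.mp hs).1 x hxt)

theorem pvFilterBlock (key : String) (q : Option String) (s : List (List (String × String)))
    (h : ∀ x ∈ s.dropWhile (fun x => pvGet key x == q), pvEnc q < pvKey key x) :
    s.filter (fun x => pvGet key x == q) = s.takeWhile (fun x => pvGet key x == q) := by
  conv_lhs => rw [← List.takeWhile_append_dropWhile (p := fun x => pvGet key x == q) (l := s)]
  rw [List.filter_append,
    List.filter_eq_self.mpr (fun x hx => List.mem_takeWhile_imp (p := fun x => pvGet key x == q) hx),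
    List.filter_eq_nil_iff.mpr (fun x hx hbx => by
      have := h x hx
      rw [pvKey, (beq_iff_eq.mp hbx)] at this
      exact lt_irrefl _ this),
    List.append_nil]

-- the merge of two key-sorted lists is the concatenation, over the sorted distinct keys,
-- of the per-key zips
theorem pvMergeA_eq_flatMap (key : String) (fill : List (String × String)) :
    ∀ (ql : List (Option String)) (s1 s2 : List (List (String × String))),
      s1.Pairwise (fun a b => pvKey key a ≤ pvKey key b) →
      s2.Pairwise (fun a b => pvKey key a ≤ pvKey key b) →
      PySem.List.sorted (PySem.Set.ofList (s1.map (pvGet key) ++ s2.map (pvGet key))) pvEnc = ql →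
      pvMergeA key fill s1 s2 =
        ql.flatMap (fun q => pvZipF fill (s1.filter (fun x => pvGet key x == q))
                                          (s2.filter (fun x => pvGet key x == q))) := by
  intro ql
  induction ql with
  | nil =>
    intro s1 s2 _ _ hq
    rw [PySem.List.sorted_eq_nil_iff] at hq
    have h1 : s1 = [] := by
      cases s1 with
      | nil => rfl
      | cons z t =>
        exfalso
        have hm : pvGet key z ∈ PySem.Set.ofList ((z :: t).map (pvGet key) ++ s2.map (pvGet key)) :=
          (PySem.Set.mem_ofList _ _).mpr (by simp)
        rw [hq] at hm
        simp at hm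
    have h2 : s2 = [] := by
      cases s2 with
      | nil => rfl
      | cons z t =>
        exfalso
        have hm : pvGet key z ∈ PySem.Set.ofList (s1.map (pvGet key) ++ (z :: t).map (pvGet key)) :=
          (PySem.Set.mem_ofList _ _).mpr (by simp)
        rw [hq] at hm
        simp at hm
    subst h1; subst h2
    rw [pvMergeA.eq_1]
    simp
  | cons q qs ih =>
    intro s1 s2 hp1 hp2 hq
    have hmin1 : ∀ x ∈ s1, pvEnc q ≤ pvKey key x := fun x hx =>
      PySem.List.key_head_sorted_le _ pvEnc hq (pvGet key x)
        ((PySem.Set.mem_ofList _ _).mpr (List.mem_append_left _ (List.mem_map_of_mem hx)))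
    have hmin2 : ∀ x ∈ s2, pvEnc q ≤ pvKey key x := fun x hx =>
      PySem.List.key_head_sorted_le _ pvEnc hq (pvGet key x)
        ((PySem.Set.mem_ofList _ _).mpr (List.mem_append_right _ (List.mem_map_of_mem hx)))
    have hd1 := pvDropWhile_gt key q s1 hp1 hmin1
    have hd2 := pvDropWhile_gt key q s2 hp2 hmin2
    have hA1 : ∀ x ∈ s1.takeWhile (fun x => pvGet key x == q), pvGet key x = q := fun x hx => by
      have := List.mem_takeWhile_imp (p := fun x => pvGet key x == q) hx; rwa [beq_iff_eq] at this
    have hA2 : ∀ x ∈ s2.takeWhile (fun x => pvGet key x == q), pvGet key x = q := fun x hx => by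
      have := List.mem_takeWhile_imp (p := fun x => pvGet key x == q) hx; rwa [beq_iff_eq] at this
    have hblock : pvMergeA key fill s1 s2
        = pvZipF fill (s1.takeWhile (fun x => pvGet key x == q)) (s2.takeWhile (fun x => pvGet key x == q))
          ++ pvMergeA key fill (s1.dropWhile (fun x => pvGet key x == q)) (s2.dropWhile (fun x => pvGet key x == q)) := by
      conv_lhs => rw [← List.takeWhile_append_dropWhile (p := fun x => pvGet key x == q) (l := s1),
                      ← List.takeWhile_append_dropWhile (p := fun x => pvGet key x == q) (l := s2)]
      exact pvMergeA_block key fill q _ _ _ _ hA1 hA2 hd1 hd2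
    have hnd : (q :: qs).Nodup := by
      rw [← hq]
      exact ((PySem.List.sorted_perm _ pvEnc false).symm).nodup (PySem.Set.nodup_ofList _)
    have hqnotin : q ∉ qs := (List.nodup_cons.mp hnd).1
    have hpw : (q :: qs).Pairwise (fun a b => pvEnc a ≤ pvEnc b) := by
      rw [← hq]; exact PySem.List.sorted_pairwise _ pvEnc
    have hstrict : (q :: qs).Pairwise (fun a b => pvEnc a < pvEnc b) :=
      (hpw.and hnd).imp (fun hab => lt_of_le_of_ne hab.1 (fun h => hab.2 (pvEnc_inj h)))
    have hfilt1 : ∀ q' ∈ qs, s1.filter (fun x => pvGet key x == q')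
        = (s1.dropWhile (fun x => pvGet key x == q)).filter (fun x => pvGet key x == q') := by
      intro q' hq'
      have hnil : (s1.takeWhile (fun x => pvGet key x == q)).filter (fun x => pvGet key x == q') = [] :=
        List.filter_eq_nil_iff.mpr (fun x hx hbx => by
          have h1 := hA1 x hx
          have h2 := beq_iff_eq.mp hbx
          rw [h1] at h2
          exact hqnotin (h2 ▸ hq'))
      conv_lhs => rw [← List.takeWhile_append_dropWhile (p := fun x => pvGet key x == q) (l := s1)]
      rw [List.filter_append, hnil, List.nil_append]
    have hfilt2 : ∀ q' ∈ qs, s2.filter (fun x => pvGet key x == q')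
        = (s2.dropWhile (fun x => pvGet key x == q)).filter (fun x => pvGet key x == q') := by
      intro q' hq'
      have hnil : (s2.takeWhile (fun x => pvGet key x == q)).filter (fun x => pvGet key x == q') = [] :=
        List.filter_eq_nil_iff.mpr (fun x hx hbx => by
          have h1 := hA2 x hx
          have h2 := beq_iff_eq.mp hbx
          rw [h1] at h2
          exact hqnotin (h2 ▸ hq'))
      conv_lhs => rw [← List.takeWhile_append_dropWhile (p := fun x => pvGet key x == q) (l := s2)]
      rw [List.filter_append, hnil, List.nil_append]
    have hperm : qs.Perm (PySem.Set.ofList ((s1.dropWhile (fun x => pvGet key x == q)).map (pvGet key)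
        ++ (s2.dropWhile (fun x => pvGet key x == q)).map (pvGet key))) := by
      apply (List.perm_ext_iff_of_nodup (List.nodup_cons.mp hnd).2 (PySem.Set.nodup_ofList _)).mpr
      intro y
      constructor
      · intro hy
        have hyS : y ∈ PySem.Set.ofList (s1.map (pvGet key) ++ s2.map (pvGet key)) := by
          rw [← PySem.List.mem_sorted (key := pvEnc) (rev := false), hq]
          exact List.mem_cons_of_mem _ hy
        have hyne : y ≠ q := fun h => hqnotin (h ▸ hy)
        rw [PySem.Set.mem_ofList] at hyS ⊢
        rcases List.mem_append.mp hyS with hyl | hyl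
        · rcases List.mem_map.mp hyl with ⟨x, hx, rfl⟩
          apply List.mem_append_left
          apply List.mem_map_of_mem
          rcases List.mem_append.mp
              ((List.takeWhile_append_dropWhile (p := fun x => pvGet key x == q) (l := s1)) ▸ hx) with hxa | hxr
          · exact absurd (hA1 x hxa) (fun h => hyne h)
          · exact hxr
        · rcases List.mem_map.mp hyl with ⟨x, hx, rfl⟩
          apply List.mem_append_right
          apply List.mem_map_of_mem
          rcases List.mem_append.mp
              ((List.takeWhile_append_dropWhile (p := fun x => pvGet key x == q) (l := s2)) ▸ hx) with hxa | hxr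
          · exact absurd (hA2 x hxa) (fun h => hyne h)
          · exact hxr
      · intro hy
        rw [PySem.Set.mem_ofList] at hy
        have hymem : y ∈ PySem.Set.ofList (s1.map (pvGet key) ++ s2.map (pvGet key)) ∧ pvEnc q < pvEnc y := by
          rcases List.mem_append.mp hy with hyl | hyl
          · rcases List.mem_map.mp hyl with ⟨x, hx, rfl⟩
            refine ⟨(PySem.Set.mem_ofList _ _).mpr (List.mem_append_left _ (List.mem_map_of_mem
              ((List.takeWhile_append_dropWhile (p := fun x => pvGet key x == q) (l := s1)) ▸
                List.mem_append_right _ hx))), hd1 x hx⟩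
          · rcases List.mem_map.mp hyl with ⟨x, hx, rfl⟩
            refine ⟨(PySem.Set.mem_ofList _ _).mpr (List.mem_append_right _ (List.mem_map_of_mem
              ((List.takeWhile_append_dropWhile (p := fun x => pvGet key x == q) (l := s2)) ▸
                List.mem_append_right _ hx))), hd2 x hx⟩
        have hysorted : y ∈ q :: qs := by
          rw [← hq]
          exact (PySem.List.mem_sorted _ pvEnc false y).mpr hymem.1
        rcases List.mem_cons.mp hysorted with rfl | hyqs
        · exact absurd hymem.2 (lt_irrefl _)
        · exact hyqs
    have hkeys : PySem.List.sorted (PySem.Set.ofList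
        ((s1.dropWhile (fun x => pvGet key x == q)).map (pvGet key)
          ++ (s2.dropWhile (fun x => pvGet key x == q)).map (pvGet key))) pvEnc = qs :=
      PySem.List.sorted_eq_of_perm_of_pairwise_lt _ qs pvEnc hperm (List.pairwise_cons.mp hstrict).2
    rw [hblock, List.flatMap_cons]
    congr 1
    · rw [pvFilterBlock key q s1 hd1, pvFilterBlock key q s2 hd2]
    · rw [ih _ _ (List.Pairwise.sublist (List.dropWhile_sublist _) hp1)
        (List.Pairwise.sublist (List.dropWhile_sublist _) hp2) hkeys]
      exact List.flatMap_congr (fun q' hq' => by rw [← hfilt1 q' hq', ← hfilt2 q' hq'])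

theorem pvFinal (l1 l2 : List (List (String × String))) (key : String) (fillvalue : Option (List (String × String))) :
    sorted_zip_longest l1 l2 key fillvalue = sorted_zip_longest_alt l1 l2 key fillvalue := by
  simp only [sorted_zip_longest, sorted_zip_longest_alt]
  rw [pvMergeA_eq_flatMap key (fillvalue.getD []) _ _ _
    (PySem.List.sorted_pairwise l1 (pvKey key)) (PySem.List.sorted_pairwise l2 (pvKey key)) rfl]
  have hks : PySem.List.sorted (PySem.Set.union (PySem.Set.ofList (pvGroup key l1).keys) (pvGroup key l2).keys) pvEnc
      = PySem.List.sorted (PySem.Set.ofList ((PySem.List.sorted l1 (pvKey key)).map (pvGet key)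
          ++ (PySem.List.sorted l2 (pvKey key)).map (pvGet key))) pvEnc := by
    apply PySem.List.sorted_eq_sorted_of_perm _ _ pvEnc pvEnc_inj
    apply (List.perm_ext_iff_of_nodup
      (PySem.Set.nodup_union _ _ (PySem.Set.nodup_ofList _)) (PySem.Set.nodup_ofList _)).mpr
    intro y
    rw [PySem.Set.mem_union, PySem.Set.mem_ofList, pvGroup_keys, pvGroup_keys,
      PySem.Set.mem_ofList, PySem.Set.mem_ofList, PySem.Set.mem_ofList]
    simp only [List.mem_append, List.mem_map, PySem.List.mem_sorted]
  rw [hks]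
  apply List.flatMap_congr
  intro q _
  rw [pvZipFill_eq, pvGroup_getD, pvGroup_getD,
    ← pvFilter_sorted key (fun x => pvGet key x == q) (pvEnc q)
        (fun x hx => by rw [pvKey, beq_iff_eq.mp hx]) l1,
    ← pvFilter_sorted key (fun x => pvGet key x == q) (pvEnc q)
        (fun x hx => by rw [pvKey, beq_iff_eq.mp hx]) l2]

-- ===== VERDICT (by name: the statement is the Claim_ definition above) =====
theorem sorted_zip_longest_spec : Claim_equal_sorted_zip_longest := by
  intro l1 l2 key fillvalue _ _
  unfold Spec_sorted_zip_longest
  exact pvFinal l1 l2 key fillvalue
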